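-- pv_equiv track=rewrite | github.com/jack-chaudier/stark | scripts/unique_minimal_referee.py | graph_from_mask
-- ===== SOURCE A (Python) =====
-- from typing import Dict, Iterable, List, Optional, Sequence, Set, Tuple
--
-- Graph = Dict[int, Set[int]]
--
-- def graph_from_mask(n: int, mask: int) -> Graph:
--     graph: Graph = {i: set() for i in range(n)}
--     bit = 0
--     for src in range(n):
--         for dst in range(src + 1, n):
--             if mask & (1 << bit):
--                 graph[src].add(dst)
--             bit += 1
--     return graph
-- ===== SOURCE B (Python) =====
-- def graph_from_mask(n, mask):
--     graph = {i: set() for i in range(n)}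
--     if n < 2:
--         return graph
--     # keep only the bits A ever reads, then walk the SET bits only,
--     # decoding each bit index to its (src, dst) pair with a moving row pointer
--     m = mask & ((1 << (n * (n - 1) // 2)) - 1)
--     src = 0
--     row_start = 0  # bit index where row `src` begins
--     while m:
--         m2 = m & (m - 1)          # m with its lowest set bit cleared
--         b = (m - m2).bit_length() - 1  # index of that lowest set bit
--         m = m2
--         while b >= row_start + (n - 1 - src):
--             row_start += n - 1 - src
--             src += 1
--         graph[src].add(src + 1 + (b - row_start))
--     return graph
-- ===== Notes on version B (the rewrite author's own statement) =====
-- stated objective: faster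
-- what changed: Instead of testing every one of the n(n-1)/2 pair bits in nested loops over (src, dst), B masks off the out-of-range high bits once and then iterates only over the SET bits of the mask, clearing the lowest set bit each step with m & (m-1) and decoding its index to (src, dst) with a monotone row pointer.
import Mathlib
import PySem

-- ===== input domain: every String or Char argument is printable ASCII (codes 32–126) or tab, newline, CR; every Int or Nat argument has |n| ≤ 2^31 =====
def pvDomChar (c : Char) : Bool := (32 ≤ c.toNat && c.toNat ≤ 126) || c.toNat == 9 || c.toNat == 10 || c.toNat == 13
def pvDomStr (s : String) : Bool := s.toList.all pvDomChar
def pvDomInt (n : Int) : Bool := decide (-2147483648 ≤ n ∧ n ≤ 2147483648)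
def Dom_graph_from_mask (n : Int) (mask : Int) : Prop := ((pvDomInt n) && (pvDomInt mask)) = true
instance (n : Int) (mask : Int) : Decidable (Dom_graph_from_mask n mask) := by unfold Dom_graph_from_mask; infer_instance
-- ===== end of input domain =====

-- B iterates only over the SET bits of the mask (clearing the lowest set bit with m & (m - 1))
-- and decodes each bit index to its (src, dst) pair with a monotone row pointer, instead of A's
-- nested loops testing every pair bit (measured faster).
-- ===== PORT A =====
def graph_from_mask (n : Int) (mask : Int) : List (Int × List Int) :=
  -- graph = {i: set() for i in range(n)}
  let graph : PySem.Dict Int (PySem.Set Int) :=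
    (PySem.List.pyRange 0 n 1).foldl (fun d i => d.insert i PySem.Set.empty) PySem.Dict.empty
  -- bit = 0; nested loops over src, dst with the running bit counter (bit is a Python int that
  -- starts at 0 and is only incremented, so carrying it as a Nat is exact); graph[src].add(dst)
  -- is Dict.modify (the key src is always present, so the default is never consulted)
  let st :=
    (PySem.List.pyRange 0 n 1).foldl (fun st src =>
      (PySem.List.pyRange (src + 1) n 1).foldl (fun st dst =>
        ((if PySem.Int.band mask (1 <<< st.2) ≠ 0 then
            st.1.modify src PySem.Set.empty (fun s => PySem.Set.add s dst)
          else st.1), st.2 + 1)) st)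
      (graph, (0 : Nat))
  st.1.items

-- ===== PORT B =====
-- the inner `while b >= row_start + (n - 1 - src)` advance loop; the fuel argument only makes
-- the recursion total: on every state the Python loop reaches, n steps are enough (proved below)
def pvAdvance (n b : Int) : Nat → Int × Int → Int × Int
  | 0, st => st
  | fuel + 1, (src, rs) =>
    if rs + (n - 1 - src) ≤ b then pvAdvance n b fuel (src + 1, rs + (n - 1 - src))
    else (src, rs)

-- the outer `while m:` loop; fuel m.toNat suffices because every iteration clears a set bit,
-- so m strictly decreases (the fuel only makes the recursion total);
-- b = (m - m2).bit_length() - 1 is PySem.Int.bitLength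
def pvLoopB (n : Int) : Nat → Int → PySem.Dict Int (PySem.Set Int) → Int → Int →
    PySem.Dict Int (PySem.Set Int)
  | 0, _, g, _, _ => g
  | fuel + 1, m, g, src, rs =>
    if m = 0 then g
    else
      let m2 := PySem.Int.band m (m - 1)
      let b : Int := (PySem.Int.bitLength (m - m2) : Int) - 1
      let st := pvAdvance n b n.toNat (src, rs)
      pvLoopB n fuel m2
        (g.modify st.1 PySem.Set.empty (fun s => PySem.Set.add s (st.1 + 1 + (b - st.2))))
        st.1 st.2

def graph_from_mask_alt (n : Int) (mask : Int) : List (Int × List Int) :=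
  -- graph = {i: set() for i in range(n)}
  let graph : PySem.Dict Int (PySem.Set Int) :=
    (PySem.List.pyRange 0 n 1).foldl (fun d i => d.insert i PySem.Set.empty) PySem.Dict.empty
  if n < 2 then graph.items
  else
    -- m = mask & ((1 << (n*(n-1)//2)) - 1); the shift amount n*(n-1)//2 is ≥ 0 here (n ≥ 2),
    -- so .toNat is exact
    let m := PySem.Int.band mask (((1 : Int) <<< (PySem.Int.floordiv (n * (n - 1)) 2).toNat) - 1)
    (pvLoopB n m.toNat m graph 0 0).items

-- ===== PRECONDITION & SPEC =====
def Spec_graph_from_mask (n : Int) (mask : Int) (out : List (Int × List Int)) : Prop := out = graph_from_mask_alt n mask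
instance (n : Int) (mask : Int) (out : List (Int × List Int)) : Decidable (Spec_graph_from_mask n mask out) := by unfold Spec_graph_from_mask; infer_instance

-- ===== CLAIM (what is proved, stated in full; the proofs are below) =====
def Claim_equal_graph_from_mask : Prop := ∀ (n : Int) (mask : Int), Dom_graph_from_mask n mask → Spec_graph_from_mask n mask (graph_from_mask n mask)

-- ===== LEMMAS AND PROOFS =====

/-- The bit test both programs perform, as a Bool predicate on the bit position. -/
def pvBit (mask : Int) (b : Nat) : Bool := PySem.Int.band (mask >>> b) 1 != 0

/-- One decoded row segment: positions a, a+1, … (w of them) whose bits off, off+1, … are set. -/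
def pvSeg (mask a : Int) (off w : Nat) : List Int :=
  ((List.range w).filter (fun k => pvBit mask (off + k))).map (fun (k : Nat) => a + (k : Int))

/-- Bits consumed by A's counter before row s starts. -/
def pvOff (n : Int) : Nat → Nat
  | 0 => 0
  | s + 1 => pvOff n s + (n - 1 - (s : Int)).toNat

/-- The first t rows of the common canonical result. -/
def pvDone (n mask : Int) (t : Nat) : List (Int × List Int) :=
  (List.range t).map
    (fun (s : Nat) => ((s : Int), pvSeg mask ((s : Int) + 1) (pvOff n s) ((n - 1 - (s : Int)).toNat)))

/-- The common canonical value of both programs. -/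
def pvCanon (n mask : Int) : List (Int × List Int) := pvDone n mask n.toNat

-- A tests `mask & (1 << b)`, B tests bit b of the masked mask; they agree (two's complement).
lemma pvBit_band_pow (mask : Int) (b : Nat) :
    (PySem.Int.band mask (1 <<< b) ≠ 0) ↔ pvBit mask b := by
  have hp : (0:Nat) < 2 ^ b := Nat.two_pow_pos b
  have hsh : ((1 <<< b : Nat) : Int) = ((2 ^ b : Nat) : Int) := by
    rw [Nat.one_shiftLeft]
  rw [pvBit, bne_iff_ne, PySem.Int.band_one,
      PySem.Int.mod_eq_emod_of_pos (by norm_num : (0:Int) < 2),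
      Int.shiftRight_eq_div_pow]
  rcases (by omega : 0 ≤ mask ∨ mask < 0) with hm | hm
  · obtain ⟨m, rfl⟩ := Int.eq_ofNat_of_zero_le hm
    rw [hsh, PySem.Int.band_natCast, Nat.and_two_pow,
        Int.ofNat_ediv_ofNat, Nat.testBit_eq_decide_div_mod_eq]
    rcases Nat.mod_two_eq_zero_or_one (m / 2 ^ b) with h | h <;>
      generalize hq : m / 2 ^ b = q at h ⊢ <;>
      simp [h] <;> omega
  · set m : Nat := (-mask - 1).toNat with hmdef
    have hmask : mask = -(m : Int) - 1 := by simp [hmdef]; omega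
    have hA : ((1 <<< b : Nat) : Int).toNat = 2 ^ b := by
      rw [Nat.one_shiftLeft, Int.toNat_natCast]
    have hlhs : PySem.Int.band mask ((1 <<< b : Nat) : Int)
        = ((2 ^ b - (m.testBit b).toNat * 2 ^ b : Nat) : Int) := by
      rw [PySem.Int.band, if_neg (by omega), if_pos (Int.natCast_nonneg _)]
      congr 1
      rw [hA, Nat.and_comm, Nat.and_two_pow]
    have hq := Nat.div_add_mod m (2 ^ b)
    have hr : m % 2 ^ b < 2 ^ b := Nat.mod_lt _ hp
    have h2 : ((2 ^ b : Nat) : Int) ≠ 0 := by positivity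
    have hdiv : mask / ((2 ^ b : Nat) : Int) = -(m / 2 ^ b : Nat) - 1 := by
      have hrepr : mask = (((2 ^ b : Nat) : Int) - 1 - (m % 2 ^ b : Nat))
          + (-(m / 2 ^ b : Nat) - 1) * ((2 ^ b : Nat) : Int) := by
        rw [hmask]; push_cast; push_cast at hq; nlinarith [hq]
      rw [hrepr, Int.add_mul_ediv_right _ _ h2,
          Int.ediv_eq_zero_of_lt (by push_cast; omega) (by push_cast; omega)]
      ring
    rw [hlhs, hdiv, Nat.testBit_eq_decide_div_mod_eq]
    rcases Nat.mod_two_eq_zero_or_one (m / 2 ^ b) with h | h <;>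
      generalize hqq : m / 2 ^ b = q at h ⊢ <;>
      simp [h] <;> omega

lemma pvSeg_succ (mask a : Int) (off w : Nat) :
    pvSeg mask a off (w + 1)
      = (if pvBit mask off then [a] else []) ++ pvSeg mask (a + 1) (off + 1) w := by
  have h1 : (fun k => pvBit mask (off + k)) ∘ Nat.succ
      = fun k => pvBit mask (off + 1 + k) := by
    funext k; simp only [Function.comp_apply]; congr 1; omega
  unfold pvSeg
  rw [List.range_succ_eq_map, List.filter_cons, List.filter_map, h1]
  simp only [Nat.add_zero]
  have hmap : (List.map Nat.succ ((List.range w).filter (fun k => pvBit mask (off + 1 + k)))).map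
      (fun (k : Nat) => a + (k : Int))
      = ((List.range w).filter (fun k => pvBit mask (off + 1 + k))).map
          (fun (k : Nat) => a + 1 + (k : Int)) := by
    rw [List.map_map]
    exact List.map_congr_left (fun k _ => by
      simp only [Function.comp_apply]; push_cast; ring)
  by_cases h : pvBit mask off
  · rw [if_pos h, List.map_cons, hmap]; simp [h]
  · rw [if_neg h, hmap]; simp [h]

-- insert on a dict whose items split around the unique occurrence of the key.
lemma pvInsert_mid (P S : List (Int × PySem.Set Int)) (src : Int) (R R' : PySem.Set Int)
    (hP : ∀ p ∈ P, p.1 ≠ src) (hS : ∀ p ∈ S, p.1 ≠ src) :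
    (PySem.Dict.mk (P ++ (src, R) :: S)).insert src R' = PySem.Dict.mk (P ++ (src, R') :: S) := by
  have hc : (PySem.Dict.mk (P ++ (src, R) :: S)).contains src = true := by
    simp only [PySem.Dict.contains, List.any_eq_true]
    exact ⟨(src, R), by simp, by simp⟩
  have hitems := PySem.Dict.items_insert_of_contains (PySem.Dict.mk (P ++ (src, R) :: S)) R' hc
  have hmap : (P ++ (src, R) :: S).map
        (fun p => if (p.1 == src) = true then (src, R') else p)
      = P ++ (src, R') :: S := by
    rw [List.map_append, List.map_cons]
    congr 1
    · have := List.map_congr_left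
        (l := P) (g := id)
        (f := fun p => if (p.1 == src) = true then (src, R') else p)
        (fun p hp => by simp [hP p hp])
      simpa using this
    · congr 1
      · simp
      · have := List.map_congr_left
          (l := S) (g := id)
          (f := fun p => if (p.1 == src) = true then (src, R') else p)
          (fun p hp => by simp [hS p hp])
        simpa using this
  calc (PySem.Dict.mk (P ++ (src, R) :: S)).insert src R'
      = PySem.Dict.mk (((PySem.Dict.mk (P ++ (src, R) :: S)).insert src R').items) := rfl
    _ = PySem.Dict.mk (P ++ (src, R') :: S) := by rw [hitems, hmap]

lemma pvGetD_mid (P S : List (Int × PySem.Set Int)) (src : Int) (R : PySem.Set Int)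
    (hP : ∀ p ∈ P, p.1 ≠ src) :
    (PySem.Dict.mk (P ++ (src, R) :: S)).getD src PySem.Set.empty = R := by
  induction P with
  | nil => simp [PySem.Dict.getD, PySem.Dict.get?]
  | cons q P ih =>
    have hq : (q.1 == src) = false := by simpa using hP q (by simp)
    have ih' := ih (fun p hp => hP p (by simp [hp]))
    simpa [PySem.Dict.getD, PySem.Dict.get?, List.find?_cons, hq] using ih'

-- A's inner loop: starting at dst = a with counter off, it appends the decoded segment to row src.
lemma pvInnerA (n mask src : Int) (P S : List (Int × PySem.Set Int))
    (hP : ∀ p ∈ P, p.1 ≠ src) (hS : ∀ p ∈ S, p.1 ≠ src) :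
    ∀ (w : Nat) (a : Int) (off : Nat) (R : PySem.Set Int), a = n - (w : Int) →
      (∀ x ∈ R, x < a) →
      ((PySem.List.pyRange a n 1).foldl (fun st dst =>
          ((if PySem.Int.band mask (1 <<< st.2) ≠ 0 then
              st.1.modify src PySem.Set.empty (fun s => PySem.Set.add s dst)
            else st.1), st.2 + 1))
        (PySem.Dict.mk (P ++ (src, R) :: S), off))
      = (PySem.Dict.mk (P ++ (src, R ++ pvSeg mask a off w) :: S), off + w) := by
  intro w
  induction w with
  | zero =>
    intro a off R ha hR
    rw [PySem.List.pyRange_one_eq_nil (by omega : n ≤ a), List.foldl_nil]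
    simp [pvSeg]
  | succ w ih =>
    intro a off R ha hR
    have han : a < n := by omega
    rw [PySem.List.pyRange_one_cons han, List.foldl_cons]
    dsimp only
    have hmod : (PySem.Dict.mk (P ++ (src, R) :: S)).modify src PySem.Set.empty
        (fun s => PySem.Set.add s a) = PySem.Dict.mk (P ++ (src, R ++ [a]) :: S) := by
      rw [PySem.Dict.modify, pvGetD_mid P S src R hP,
          PySem.Set.add_of_not_mem (fun hmem => absurd (hR a hmem) (lt_irrefl a)),
          pvInsert_mid P S src R _ hP hS]
    by_cases h : pvBit mask off
    · rw [if_pos ((pvBit_band_pow mask off).mpr h), hmod,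
          ih (a + 1) (off + 1) (R ++ [a]) (by omega)
            (by intro x hx
                rcases List.mem_append.mp hx with hx | hx
                · exact lt_trans (hR x hx) (by omega)
                · simp at hx; omega),
          pvSeg_succ, if_pos h]
      simp only [Prod.mk.injEq, List.append_assoc]
      exact ⟨trivial, by omega⟩
    · rw [if_neg (fun hc => h ((pvBit_band_pow mask off).mp hc)),
          ih (a + 1) (off + 1) R (by omega)
            (by intro x hx; exact lt_trans (hR x hx) (by omega)),
          pvSeg_succ, if_neg h]
      simp only [Prod.mk.injEq, List.nil_append]
      exact ⟨trivial, by omega⟩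

-- A's outer loop: rows below s are finished, rows from s on are still empty.
lemma pvOuterA (n mask : Int) :
    ∀ (w : Nat) (s : Int), 0 ≤ s → s = n - (w : Int) →
      ((PySem.List.pyRange s n 1).foldl (fun st src =>
          (PySem.List.pyRange (src + 1) n 1).foldl (fun st dst =>
            ((if PySem.Int.band mask (1 <<< st.2) ≠ 0 then
                st.1.modify src PySem.Set.empty (fun s => PySem.Set.add s dst)
              else st.1), st.2 + 1)) st)
        (PySem.Dict.mk (pvDone n mask s.toNat
            ++ (PySem.List.pyRange s n 1).map (fun i => (i, ([] : List Int)))), pvOff n s.toNat))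
      = (PySem.Dict.mk (pvDone n mask (s.toNat + w)), pvOff n (s.toNat + w)) := by
  intro w
  induction w with
  | zero =>
    intro s hs0 hs
    rw [PySem.List.pyRange_one_eq_nil (by omega : n ≤ s)]
    simp
  | succ w ih =>
    intro s hs0 hs
    have hsn : s < n := by omega
    rw [PySem.List.pyRange_one_cons hsn, List.map_cons, List.foldl_cons]
    have hP : ∀ p ∈ pvDone n mask s.toNat, p.1 ≠ s := by
      intro p hp
      simp only [pvDone, List.mem_map, List.mem_range] at hp
      obtain ⟨i, hi, rfl⟩ := hp
      dsimp only
      omega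
    have hS : ∀ p ∈ (PySem.List.pyRange (s + 1) n 1).map (fun i => (i, ([] : List Int))),
        p.1 ≠ s := by
      intro p hp
      simp only [List.mem_map] at hp
      obtain ⟨i, hi, rfl⟩ := hp
      have := (PySem.List.mem_pyRange_one.mp hi).1
      dsimp only
      omega
    rw [pvInnerA n mask s (pvDone n mask s.toNat) _ hP hS w (s + 1) (pvOff n s.toNat) []
        (by omega) (by intro x hx; simp at hx)]
    have hw : (n - 1 - (s.toNat : Int)).toNat = w := by omega
    have hcast : ((s.toNat : Int)) = s := by omega
    have hdone : pvDone n mask (s.toNat + 1)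
        = pvDone n mask s.toNat
          ++ [((s.toNat : Int), pvSeg mask ((s.toNat : Int) + 1) (pvOff n s.toNat) w)] := by
      unfold pvDone
      rw [List.range_succ, List.map_append, List.map_cons, List.map_nil, hw]
    have hoff : pvOff n (s.toNat + 1) = pvOff n s.toNat + w := by
      show pvOff n s.toNat + (n - 1 - (s.toNat : Int)).toNat = _
      rw [hw]
    have hstate : pvDone n mask s.toNat
          ++ ((s, [] ++ pvSeg mask (s + 1) (pvOff n s.toNat) w)
              :: (PySem.List.pyRange (s + 1) n 1).map (fun i => (i, ([] : List Int))))
        = pvDone n mask (s.toNat + 1)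
          ++ (PySem.List.pyRange (s + 1) n 1).map (fun i => (i, ([] : List Int))) := by
      rw [hdone, hcast]
      simp [List.append_assoc]
    rw [hstate, show pvOff n s.toNat + w = pvOff n (s.toNat + 1) from hoff.symm]
    have hfin := ih (s + 1) (by omega) (by omega)
    rw [show (s + 1).toNat = s.toNat + 1 from by omega] at hfin
    rw [show s.toNat + 1 + w = s.toNat + (w + 1) from by omega] at hfin
    exact hfin

-- closed-form triangular offset used by B = A's accumulated counter
lemma pvOff_closed (n : Int) (k : Nat) (hk : (k : Int) ≤ n) :
    ((k : Int) * n - PySem.Int.floordiv ((k : Int) * ((k : Int) + 1)) 2).toNat = pvOff n k := by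
  revert hk
  induction k with
  | zero =>
    intro _
    norm_num [pvOff, PySem.Int.floordiv_eq_ediv_of_pos (by norm_num : (0:Int) < 2)]
  | succ k ih =>
    intro hk
    obtain ⟨t, ht⟩ : ∃ t, (k : Int) * ((k : Int) + 1) = 2 * t := by
      rcases Int.even_mul_succ_self (k : Int) with ⟨t, ht⟩
      exact ⟨t, by omega⟩
    have hT : PySem.Int.floordiv ((k : Int) * ((k : Int) + 1)) 2 = t := by
      rw [PySem.Int.floordiv_eq_ediv_of_pos (by norm_num : (0:Int) < 2), ht,
          Int.mul_ediv_cancel_left t (by norm_num)]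
    have hT1 : PySem.Int.floordiv (((k + 1 : Nat) : Int) * (((k + 1 : Nat) : Int) + 1)) 2
        = t + ((k : Int) + 1) := by
      have hx : ((k + 1 : Nat) : Int) * (((k + 1 : Nat) : Int) + 1)
          = 2 * (t + ((k : Int) + 1)) := by push_cast; nlinarith [ht]
      rw [PySem.Int.floordiv_eq_ediv_of_pos (by norm_num : (0:Int) < 2), hx,
          Int.mul_ediv_cancel_left _ (by norm_num)]
    have h2 : (k : Int) * ((k : Int) + 1) ≤ (k : Int) * (2 * n) :=
      mul_le_mul_of_nonneg_left (by omega) (by positivity)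
    have h3 : 2 * t ≤ 2 * ((k : Int) * n) := by nlinarith [h2, ht]
    have hstep : pvOff n (k + 1) = pvOff n k + (n - 1 - (k : Int)).toNat := rfl
    rw [hstep, ← ih (by omega), hT, hT1,
        show ((k + 1 : Nat) : Int) * n = (k : Int) * n + n from by push_cast; ring]
    generalize (k : Int) * n = P at h3 ⊢
    omega

-- the initial dict {i: set() for i in range(n)} as an explicit association list
lemma pvInitGraph (n : Int) :
    (PySem.List.pyRange 0 n 1).foldl
        (fun d i => d.insert i PySem.Set.empty) PySem.Dict.empty
      = PySem.Dict.mk ((PySem.List.pyRange 0 n 1).map (fun i => (i, ([] : List Int)))) := by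
  have hfresh := PySem.Dict.items_foldl_insert_fresh (PySem.List.pyRange 0 n 1)
    (fun i => i) (fun _ => (PySem.Set.empty : PySem.Set Int)) PySem.Dict.empty
    (fun a _ => by simp [PySem.Dict.contains, PySem.Dict.empty])
    (by simpa using PySem.List.nodup_pyRange_one 0 n)
  calc (PySem.List.pyRange 0 n 1).foldl
        (fun d i => d.insert i PySem.Set.empty) PySem.Dict.empty
      = PySem.Dict.mk (((PySem.List.pyRange 0 n 1).foldl
          (fun d i => d.insert i PySem.Set.empty) PySem.Dict.empty).items) := rfl
    _ = _ := by rw [hfresh]; simp [PySem.Dict.empty, PySem.Set.empty]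

theorem pvA_eq_canon (n mask : Int) : graph_from_mask n mask = pvCanon n mask := by
  unfold graph_from_mask
  rcases (by omega : n ≤ 0 ∨ 0 < n) with hn | hn
  · rw [PySem.List.pyRange_one_eq_nil (by omega : n ≤ 0)]
    simp [pvCanon, pvDone, show n.toNat = 0 from by omega, PySem.Dict.empty]
  · rw [pvInitGraph]
    have houter := pvOuterA n mask n.toNat 0 le_rfl (by omega)
    simp only [Int.toNat_zero, Nat.zero_add] at houter
    have hitems := congrArg (fun p : PySem.Dict Int (PySem.Set Int) × Nat => p.1.items) houter
    simp only at hitems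
    exact hitems

-- ---------- B-side ----------

/-- `pvOff` as an Int-valued function of an Int row index. -/
def pvOffI (n s : Int) : Int := ((pvOff n s.toNat : Nat) : Int)

/-- B's fold step over one absolute set-bit index. -/
def pvStepB (n : Int) (st : PySem.Dict Int (PySem.Set Int) × Int × Int) (b : Nat) :
    PySem.Dict Int (PySem.Set Int) × Int × Int :=
  let s := pvAdvance n (b : Int) n.toNat (st.2.1, st.2.2)
  (st.1.modify s.1 PySem.Set.empty (fun r => PySem.Set.add r (s.1 + 1 + ((b : Int) - s.2))),
    s.1, s.2)

/-- Every positive Nat is (odd part) · 2^t: m = 2^(t+1)·h + 2^t. -/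
lemma pvDecomp (m0 : Nat) (hm : 0 < m0) : ∃ t h, m0 = 2 ^ (t + 1) * h + 2 ^ t := by
  revert hm
  induction m0 using Nat.strong_induction_on with
  | _ m0 ih =>
    intro hm
    rcases Nat.even_or_odd m0 with ⟨k, hk⟩ | ⟨k, hk⟩
    · obtain ⟨t, h, hth⟩ := ih k (by omega) (by omega)
      exact ⟨t + 1, h, by subst hk; rw [show k + k = 2 * k from by ring, hth]; ring⟩
    · exact ⟨0, k, by omega⟩

/-- Clearing the lowest set bit: m & (m-1). -/
lemma pvLandPred (t h : Nat) :
    (2 ^ (t + 1) * h + 2 ^ t) &&& (2 ^ (t + 1) * h + 2 ^ t - 1) = 2 ^ (t + 1) * h := by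
  have hp : (0:Nat) < 2 ^ t := Nat.two_pow_pos t
  have h1 : 2 ^ (t + 1) * h + 2 ^ t - 1 = 2 ^ (t + 1) * h + (2 ^ t - 1) := by omega
  have hb1 : (2 ^ t : Nat) < 2 ^ (t + 1) := Nat.pow_lt_pow_right one_lt_two (by omega)
  have hb2 : (2 ^ t - 1 : Nat) < 2 ^ (t + 1) := by omega
  have hb0 : (0 : Nat) < 2 ^ (t + 1) := Nat.two_pow_pos _
  apply Nat.eq_of_testBit_eq
  intro i
  rw [Nat.testBit_land, h1,
      Nat.testBit_two_pow_mul_add _ hb1 i, Nat.testBit_two_pow_mul_add _ hb2 i,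
      show 2 ^ (t + 1) * h = 2 ^ (t + 1) * h + 0 from by omega,
      Nat.testBit_two_pow_mul_add _ hb0 i]
  by_cases hi : i < t + 1
  · rw [if_pos hi, if_pos hi, if_pos hi, Nat.zero_testBit, Nat.testBit_two_pow,
        Nat.testBit_two_pow_sub_one]
    by_cases ht : t = i <;> simp [ht]
  · rw [if_neg hi, if_neg hi, if_neg hi, Bool.and_self]

/-- Python's bit_length of a power of two. -/
lemma pvBitLen_two_pow (t : Nat) : PySem.Int.bitLength ((2 ^ t : Nat) : Int) = t + 1 := by
  have hp : (0:Nat) < 2 ^ t := Nat.two_pow_pos t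
  have h1 := PySem.Int.lt_two_pow_bitLength ((2 ^ t : Nat) : Int)
  have h2 := PySem.Int.two_pow_bitLength_le ((2 ^ t : Nat) : Int)
    (by positivity)
  rw [Int.natAbs_natCast] at h1 h2
  have h3 : t < PySem.Int.bitLength ((2 ^ t : Nat) : Int) :=
    (Nat.pow_lt_pow_iff_right one_lt_two).mp h1
  have h4 : PySem.Int.bitLength ((2 ^ t : Nat) : Int) - 1 ≤ t :=
    (Nat.pow_le_pow_iff_right one_lt_two).mp h2
  omega

/-- x & ((1 << T) - 1) is x mod 2^T. -/
lemma pvBandMask (a : Int) (T : Nat) :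
    PySem.Int.band a (((1 : Int) <<< T) - 1) = a % ((2 ^ T : Nat) : Int) := by
  have hP : (0:Nat) < 2 ^ T := Nat.two_pow_pos T
  have hsh : ((1 : Int) <<< T) - 1 = ((2 ^ T - 1 : Nat) : Int) := by
    rw [Int.shiftLeft_eq, Nat.cast_sub (Nat.one_le_two_pow)]
    push_cast
    ring
  rw [hsh]
  rcases (by omega : 0 ≤ a ∨ a < 0) with ha | ha
  · rw [PySem.Int.band_of_nonneg ha (Int.natCast_nonneg _), Int.toNat_natCast,
        Nat.and_two_pow_sub_one_eq_mod]
    conv_rhs => rw [← Int.toNat_of_nonneg ha]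
    exact_mod_cast rfl
  · rw [PySem.Int.band, if_neg (by omega), if_pos (Int.natCast_nonneg _), Int.toNat_natCast,
        Nat.and_comm, Nat.and_two_pow_sub_one_eq_mod]
    set x : Nat := (-a - 1).toNat with hxdef
    set q : Nat := x / 2 ^ T with hqdef
    set r : Nat := x % 2 ^ T with hrdef
    have hx : a = -(x : Int) - 1 := by omega
    have hxm : r < 2 ^ T := Nat.mod_lt _ hP
    have hqP : (x : Int) = ((2 ^ T : Nat) : Int) * (q : Int) + (r : Int) := by
      exact_mod_cast (Nat.div_add_mod x (2 ^ T)).symm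
    have key : a % ((2 ^ T : Nat) : Int)
        = (a + ((q : Int) + 1) * ((2 ^ T : Nat) : Int)) % ((2 ^ T : Nat) : Int) :=
      (Int.add_mul_emod_self_right a ((q : Int) + 1) _).symm
    have hval : a + ((q : Int) + 1) * ((2 ^ T : Nat) : Int) = ((2 ^ T - 1 - r : Nat) : Int) := by
      have hcast : ((2 ^ T - 1 - r : Nat) : Int) = ((2 ^ T : Nat) : Int) - 1 - (r : Int) := by
        omega
      rw [hx, hcast]
      linear_combination -hqP
    rw [key, hval, Int.emod_eq_of_lt (Int.natCast_nonneg _) (by omega)]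

lemma pvBit_natCast (m0 b : Nat) : pvBit ((m0 : Nat) : Int) b = m0.testBit b := by
  have hsr : ((m0 : Int) >>> b) = ((m0 >>> b : Nat) : Int) := Int.mem_toNat?.mp rfl
  rw [pvBit, hsr, show (1 : Int) = ((1 : Nat) : Int) from rfl, PySem.Int.band_natCast,
      Nat.and_one_is_mod, Nat.shiftRight_eq_div_pow, Nat.testBit_eq_decide_div_mod_eq]
  rcases Nat.mod_two_eq_zero_or_one (m0 / 2 ^ b) with h | h <;> rw [h] <;> simp

lemma pvBit_emod (a : Int) (T b : Nat) (hb : b < T) :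
    pvBit (a % ((2 ^ T : Nat) : Int)) b = pvBit a b := by
  have hPb : (((2 ^ b : Nat) : Int)) ≠ 0 := by positivity
  set M := a % ((2 ^ T : Nat) : Int) with hM
  have hsplit : a = M
      + (a / ((2 ^ T : Nat) : Int) * ((2 ^ (T - b - 1) : Nat) : Int) * 2) * ((2 ^ b : Nat) : Int) := by
    have h1 : ((2 ^ (T - b - 1) : Nat) : Int) * 2 * ((2 ^ b : Nat) : Int)
        = ((2 ^ T : Nat) : Int) := by
      push_cast
      calc (2 : Int) ^ (T - b - 1) * 2 * 2 ^ b = 2 ^ (T - b - 1) * 2 ^ 1 * 2 ^ b := by norm_num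
        _ = 2 ^ (T - b - 1 + 1 + b) := by rw [← pow_add, ← pow_add]
        _ = 2 ^ T := by congr 1; omega
    have h2 := Int.ediv_add_emod a ((2 ^ T : Nat) : Int)
    calc a = ((2 ^ T : Nat) : Int) * (a / ((2 ^ T : Nat) : Int)) + M := h2.symm
      _ = _ := by rw [← h1]; ring
  rw [pvBit, pvBit, PySem.Int.band_one, PySem.Int.band_one,
      PySem.Int.mod_eq_emod_of_pos (by norm_num : (0:Int) < 2),
      PySem.Int.mod_eq_emod_of_pos (by norm_num : (0:Int) < 2),
      Int.shiftRight_eq_div_pow, Int.shiftRight_eq_div_pow]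
  conv_rhs => rw [hsplit]
  rw [Int.add_mul_ediv_right _ _ hPb, Int.add_mul_emod_self_right]

/-- Peeling the lowest set bit off the sorted list of set-bit indices. -/
lemma pvBits_peel (T t h : Nat) (hlt : 2 ^ (t + 1) * h + 2 ^ t < 2 ^ T) :
    (List.range T).filter (fun i => (2 ^ (t + 1) * h + 2 ^ t).testBit i)
      = t :: (List.range T).filter (fun i => (2 ^ (t + 1) * h).testBit i) := by
  have hp : (0:Nat) < 2 ^ t := Nat.two_pow_pos t
  have hb1 : (2 ^ t : Nat) < 2 ^ (t + 1) := Nat.pow_lt_pow_right one_lt_two (by omega)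
  have hb0 : (0:Nat) < 2 ^ (t + 1) := Nat.two_pow_pos _
  have htT : t < T := by
    have h2 : (2 ^ t : Nat) < 2 ^ T := by omega
    exact (Nat.pow_lt_pow_iff_right one_lt_two).mp h2
  have hx : ∀ i, (2 ^ (t + 1) * h + 2 ^ t).testBit i
      = if i < t + 1 then (2 ^ t : Nat).testBit i else h.testBit (i - (t + 1)) :=
    fun i => Nat.testBit_two_pow_mul_add _ hb1 i
  have hy : ∀ i, (2 ^ (t + 1) * h).testBit i
      = if i < t + 1 then false else h.testBit (i - (t + 1)) := by
    intro i
    rw [show 2 ^ (t + 1) * h = 2 ^ (t + 1) * h + 0 from (Nat.add_zero _).symm,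
        Nat.testBit_two_pow_mul_add _ hb0 i]
    simp [Nat.zero_testBit]
  rw [show T = (t + 1) + (T - (t + 1)) from by omega, List.range_add, List.range_succ]
  rw [List.filter_append, List.filter_append, List.filter_append, List.filter_append]
  have hlow_x : (List.range t).filter (fun i => (2 ^ (t + 1) * h + 2 ^ t).testBit i) = [] := by
    rw [List.filter_eq_nil_iff]
    intro i hi
    rw [List.mem_range] at hi
    rw [hx i, if_pos (by omega), Nat.testBit_two_pow]
    simp
    omega
  have hlow_y : (List.range t).filter (fun i => (2 ^ (t + 1) * h).testBit i) = [] := by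
    rw [List.filter_eq_nil_iff]
    intro i hi
    rw [List.mem_range] at hi
    rw [hy i, if_pos (by omega)]
    simp
  have hat_x : [t].filter (fun i => (2 ^ (t + 1) * h + 2 ^ t).testBit i) = [t] := by
    simp [hx t, Nat.testBit_two_pow_self]
  have hat_y : [t].filter (fun i => (2 ^ (t + 1) * h).testBit i) = [] := by
    simp [hy t]
  have htail : (List.map (fun i => t + 1 + i) (List.range (T - (t + 1)))).filter
        (fun i => (2 ^ (t + 1) * h + 2 ^ t).testBit i)
      = (List.map (fun i => t + 1 + i) (List.range (T - (t + 1)))).filter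
        (fun i => (2 ^ (t + 1) * h).testBit i) := by
    apply List.filter_congr
    intro i hi
    rw [List.mem_map] at hi
    obtain ⟨j, _, rfl⟩ := hi
    rw [hx, hy, if_neg (by omega), if_neg (by omega)]
  rw [hlow_x, hlow_y, hat_x, hat_y, htail]
  simp

/-- The while-m loop is the fold of `pvStepB` over the set-bit indices, in increasing order. -/
lemma pvLoop_eq_fold (n : Int) (T : Nat) :
    ∀ (m0 fuel : Nat), m0 ≤ fuel → m0 < 2 ^ T → ∀ (g : PySem.Dict Int (PySem.Set Int)) (p rp : Int),
      pvLoopB n fuel ((m0 : Nat) : Int) g p rp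
        = (((List.range T).filter m0.testBit).foldl (pvStepB n) (g, p, rp)).1 := by
  intro m0
  induction m0 using Nat.strong_induction_on with
  | _ m0 ih =>
    intro fuel hfuel hlt g p rp
    rcases Nat.eq_zero_or_pos m0 with h0 | h0
    · subst h0
      have hnil : (List.range T).filter (Nat.testBit 0) = [] := by
        rw [List.filter_eq_nil_iff]
        intro i _
        simp [Nat.zero_testBit]
      rw [hnil]
      cases fuel with
      | zero => rfl
      | succ f => simp [pvLoopB]
    · obtain ⟨t, h, hth⟩ := pvDecomp m0 h0
      cases fuel with
      | zero => omega
      | succ f =>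
        have hm0 : ((m0 : Nat) : Int) ≠ 0 := by
          exact_mod_cast Nat.pos_iff_ne_zero.mp h0
        have hm1 : ((m0 : Nat) : Int) - 1 = ((m0 - 1 : Nat) : Int) := by omega
        have hband : PySem.Int.band ((m0 : Nat) : Int) (((m0 : Nat) : Int) - 1)
            = ((2 ^ (t + 1) * h : Nat) : Int) := by
          rw [hm1, PySem.Int.band_natCast]
          congr 1
          rw [hth]
          exact pvLandPred t h
        have hlow : ((m0 : Nat) : Int) - ((2 ^ (t + 1) * h : Nat) : Int) = ((2 ^ t : Nat) : Int) := by
          rw [hth]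
          push_cast
          ring
        have hb : (PySem.Int.bitLength ((2 ^ t : Nat) : Int) : Int) - 1 = ((t : Nat) : Int) := by
          rw [pvBitLen_two_pow]
          push_cast
          ring
        have hpeel : (List.range T).filter m0.testBit
            = t :: (List.range T).filter (2 ^ (t + 1) * h).testBit := by
          rw [hth]
          exact pvBits_peel T t h (hth ▸ hlt)
        have hp : (0:Nat) < 2 ^ t := Nat.two_pow_pos t
        have d1 : 2 ^ (t + 1) * h < m0 := by omega
        have d2 : 2 ^ (t + 1) * h ≤ f := by omega
        have d3 : 2 ^ (t + 1) * h < 2 ^ T := by omega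
        rw [hpeel, List.foldl_cons]
        simp only [pvLoopB, if_neg hm0, hband, hlow, hb]
        rw [ih (2 ^ (t + 1) * h) d1 f d2 d3]
        rfl

lemma pvOffI_succ (n s : Int) (h0 : 0 ≤ s) (h1 : s ≤ n - 1) :
    pvOffI n (s + 1) = pvOffI n s + (n - 1 - s) := by
  unfold pvOffI
  rw [show (s + 1).toNat = s.toNat + 1 from by omega]
  show ((pvOff n s.toNat + (n - 1 - ((s.toNat : Nat) : Int)).toNat : Nat) : Int) = _
  generalize pvOff n s.toNat = A
  omega

lemma pvOff_mono (n : Int) (a b : Nat) (h : a ≤ b) : pvOff n a ≤ pvOff n b := by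
  induction b with
  | zero =>
    have ha : a = 0 := by omega
    subst ha
    exact le_refl _
  | succ b ih =>
    rcases Nat.lt_or_ge a (b + 1) with hab | hab
    · have h2 : pvOff n b ≤ pvOff n (b + 1) := by
        show pvOff n b ≤ pvOff n b + (n - 1 - (b : Int)).toNat
        omega
      exact le_trans (ih (by omega)) h2
    · have ha : a = b + 1 := by omega
      subst ha
      exact le_refl _

/-- The advance loop lands on the row containing bit b. -/
lemma pvAdvance_spec (n : Int) :
    ∀ (fuel : Nat) (p s b : Int), 0 ≤ p → p ≤ s → s ≤ n - 1 →
      (s - p).toNat ≤ fuel → pvOffI n s ≤ b → b < pvOffI n s + (n - 1 - s) →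
      pvAdvance n b fuel (p, pvOffI n p) = (s, pvOffI n s) := by
  intro fuel
  induction fuel with
  | zero =>
    intro p s b h0 hps hsn hf hb1 hb2
    have hp : p = s := by omega
    subst hp
    rfl
  | succ f ih =>
    intro p s b h0 hps hsn hf hb1 hb2
    show (if pvOffI n p + (n - 1 - p) ≤ b then
        pvAdvance n b f (p + 1, pvOffI n p + (n - 1 - p)) else (p, pvOffI n p)) = _
    rcases eq_or_lt_of_le hps with hp | hp
    · subst hp
      rw [if_neg (by omega)]
    · have hsucc : pvOffI n (p + 1) = pvOffI n p + (n - 1 - p) :=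
        pvOffI_succ n p h0 (by omega)
      have hmono : pvOffI n (p + 1) ≤ pvOffI n s := by
        unfold pvOffI
        have := pvOff_mono n (p + 1).toNat s.toNat (by omega)
        omega
      rw [if_pos (by omega), ← hsucc]
      exact ih (p + 1) s b (by omega) (by omega) hsn (by omega) hb1 hb2

/-- Folding one row's set bits fills exactly that row, in increasing dst order. -/
lemma pvInnerB (n s : Int) (P S : List (Int × PySem.Set Int)) (hn : 2 ≤ n)
    (hP : ∀ q ∈ P, q.1 ≠ s) (hS : ∀ q ∈ S, q.1 ≠ s) (hs0 : 0 ≤ s) (hsn : s ≤ n - 1) :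
    ∀ (l : List Nat) (p : Int) (R : PySem.Set Int), l.Pairwise (· < ·) →
      (∀ j ∈ l, (j : Int) < n - 1 - s) → (∀ x ∈ R, ∀ j ∈ l, x < s + 1 + (j : Int)) →
      0 ≤ p → p ≤ s →
      ∃ p', 0 ≤ p' ∧ p' ≤ s ∧
        (l.map (fun j => pvOff n s.toNat + j)).foldl (pvStepB n)
            (PySem.Dict.mk (P ++ (s, R) :: S), p, pvOffI n p)
          = (PySem.Dict.mk (P ++ (s, R ++ l.map (fun (j : Nat) => s + 1 + (j : Int))) :: S),
              p', pvOffI n p') := by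
  intro l
  induction l with
  | nil =>
    intro p R _ _ _ hp0 hps
    exact ⟨p, hp0, hps, by simp⟩
  | cons j l ihl =>
    intro p R hpair hjlt hRlt hp0 hps
    have hj : (j : Int) < n - 1 - s := hjlt j (List.mem_cons_self)
    rw [List.map_cons, List.foldl_cons]
    have hadv : pvAdvance n ((pvOff n s.toNat + j : Nat) : Int) n.toNat (p, pvOffI n p)
        = (s, pvOffI n s) := by
      apply pvAdvance_spec n n.toNat p s _ hp0 hps hsn (by omega)
      · show pvOffI n s ≤ _
        unfold pvOffI
        push_cast
        omega
      · show _ < pvOffI n s + (n - 1 - s)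
        unfold pvOffI
        push_cast
        omega
    have hnew : (s + 1 + (j : Int)) ∉ R := fun hmem => by
      have := hRlt _ hmem j (List.mem_cons_self)
      omega
    have hstep : pvStepB n (PySem.Dict.mk (P ++ (s, R) :: S), p, pvOffI n p)
          (pvOff n s.toNat + j)
        = (PySem.Dict.mk (P ++ (s, R ++ [s + 1 + (j : Int)]) :: S), s, pvOffI n s) := by
      simp only [pvStepB, hadv]
      rw [show s + 1 + (((pvOff n s.toNat + j : Nat) : Int) - pvOffI n s) = s + 1 + (j : Int)
            from by unfold pvOffI; push_cast; ring,
          PySem.Dict.modify, pvGetD_mid P S s R hP,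
          PySem.Set.add_of_not_mem hnew, pvInsert_mid P S s R _ hP hS]
    obtain ⟨p', h1, h2, h3⟩ := ihl s (R ++ [s + 1 + (j : Int)])
      (hpair.of_cons)
      (fun j' hj' => hjlt j' (List.mem_cons_of_mem _ hj'))
      (by
        intro x hx j' hj'
        rcases List.mem_append.mp hx with hx | hx
        · have h4 := hRlt x hx j (List.mem_cons_self)
          have h5 := (List.pairwise_cons.mp hpair).1 j' hj'
          omega
        · simp only [List.mem_singleton] at hx
          have h5 := (List.pairwise_cons.mp hpair).1 j' hj'
          omega)
      hs0 le_rfl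
    refine ⟨p', h1, h2, ?_⟩
    rw [hstep, h3]
    simp [List.append_assoc]

/-- The set bits of row k, as absolute bit indices (increasing). -/
def pvRowBits (m0 : Nat) (n : Int) (k : Nat) : List Nat :=
  ((List.range ((n - 1 - (k : Int)).toNat)).filter
      (fun j => m0.testBit (pvOff n k + j))).map (fun j => pvOff n k + j)

def pvRowsList (m0 : Nat) (n : Int) : Nat → List Nat
  | 0 => []
  | k + 1 => pvRowsList m0 n k ++ pvRowBits m0 n k

def pvRowsFrom (m0 : Nat) (n : Int) : Nat → Nat → List Nat
  | 0, _ => []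
  | w + 1, k => pvRowBits m0 n k ++ pvRowsFrom m0 n w (k + 1)

lemma pvFilter_rows (m0 : Nat) (n : Int) :
    ∀ k : Nat, (List.range (pvOff n k)).filter m0.testBit = pvRowsList m0 n k := by
  intro k
  induction k with
  | zero => rfl
  | succ k ih =>
    show (List.range (pvOff n k + (n - 1 - (k : Int)).toNat)).filter _ = _
    rw [List.range_add, List.filter_append, ih]
    congr 1
    rw [List.filter_map]
    rfl

lemma pvRowsList_eq_from (m0 : Nat) (n : Int) :
    ∀ (w k : Nat), pvRowsList m0 n (k + w) = pvRowsList m0 n k ++ pvRowsFrom m0 n w k := by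
  intro w
  induction w with
  | zero => intro k; simp [pvRowsFrom]
  | succ w ih =>
    intro k
    rw [show k + (w + 1) = (k + 1) + w from by omega, ih (k + 1),
        show pvRowsList m0 n (k + 1) = pvRowsList m0 n k ++ pvRowBits m0 n k from rfl,
        List.append_assoc]
    rfl

/-- B's outer structure: processing rows k, k+1, … finishes the dict. -/
lemma pvOuterB (n mask : Int) (m0 : Nat) (hn : 2 ≤ n)
    (htb : ∀ b : Nat, b < pvOff n n.toNat → m0.testBit b = pvBit mask b) :
    ∀ (w k : Nat), (k : Int) + (w : Int) = n → ∀ (p : Int), 0 ≤ p → p ≤ (k : Int) →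
      ∃ p', (pvRowsFrom m0 n w k).foldl (pvStepB n)
          (PySem.Dict.mk (pvDone n mask k
              ++ (PySem.List.pyRange (k : Int) n 1).map (fun i => (i, ([] : List Int)))),
            p, pvOffI n p)
        = (PySem.Dict.mk (pvDone n mask n.toNat), p', pvOffI n p') := by
  intro w
  induction w with
  | zero =>
    intro k hkw p hp0 hpk
    have hkn : k = n.toNat := by omega
    subst hkn
    rw [PySem.List.pyRange_one_eq_nil (by omega)]
    exact ⟨p, by simp [pvRowsFrom]⟩
  | succ w ih =>
    intro k hkw p hp0 hpk
    have hkn : (k : Int) < n := by push_cast at hkw ⊢; omega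
    rw [show pvRowsFrom m0 n (w + 1) k = pvRowBits m0 n k ++ pvRowsFrom m0 n w (k + 1)
          from rfl,
        List.foldl_append, PySem.List.pyRange_one_cons hkn, List.map_cons]
    have hP : ∀ q ∈ pvDone n mask k, q.1 ≠ (k : Int) := by
      intro q hq
      simp only [pvDone, List.mem_map, List.mem_range] at hq
      obtain ⟨i, hi, rfl⟩ := hq
      dsimp only
      omega
    have hS : ∀ q ∈ (PySem.List.pyRange ((k : Int) + 1) n 1).map (fun i => (i, ([] : List Int))),
        q.1 ≠ (k : Int) := by
      intro q hq
      simp only [List.mem_map] at hq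
      obtain ⟨i, hi, rfl⟩ := hq
      have := (PySem.List.mem_pyRange_one.mp hi).1
      dsimp only
      omega
    obtain ⟨p', hp'0, hp'k, hfold⟩ := pvInnerB n (k : Int) (pvDone n mask k)
      ((PySem.List.pyRange ((k : Int) + 1) n 1).map (fun i => (i, ([] : List Int))))
      hn hP hS (Int.natCast_nonneg k) (by omega)
      ((List.range ((n - 1 - (k : Int)).toNat)).filter (fun j => m0.testBit (pvOff n k + j)))
      p []
      (List.Pairwise.sublist List.filter_sublist List.pairwise_lt_range)
      (by
        intro j hj
        have := List.mem_range.mp (List.mem_of_mem_filter hj)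
        omega)
      (by simp)
      hp0 hpk
    simp only [Int.toNat_natCast] at hfold
    rw [show pvRowBits m0 n k
          = ((List.range ((n - 1 - (k : Int)).toNat)).filter
              (fun j => m0.testBit (pvOff n k + j))).map (fun j => pvOff n k + j) from rfl,
        hfold]
    have hoffb : pvOff n k + (n - 1 - (k : Int)).toNat = pvOff n (k + 1) := rfl
    have hTle : pvOff n (k + 1) ≤ pvOff n n.toNat :=
      pvOff_mono n (k + 1) n.toNat (by omega)
    have hseg : ((List.range ((n - 1 - (k : Int)).toNat)).filter
            (fun j => m0.testBit (pvOff n k + j))).map (fun (j : Nat) => (k : Int) + 1 + (j : Int))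
        = pvSeg mask ((k : Int) + 1) (pvOff n k) ((n - 1 - (k : Int)).toNat) := by
      unfold pvSeg
      have hfc : (List.range ((n - 1 - (k : Int)).toNat)).filter
            (fun j => m0.testBit (pvOff n k + j))
          = (List.range ((n - 1 - (k : Int)).toNat)).filter
            (fun j => pvBit mask (pvOff n k + j)) :=
        List.filter_congr (fun j hj => by
          have hjr := List.mem_range.mp hj
          exact htb (pvOff n k + j) (by omega))
      rw [hfc]
    have hstate : pvDone n mask k
          ++ (((k : Int), [] ++ ((List.range ((n - 1 - (k : Int)).toNat)).filter
                (fun j => m0.testBit (pvOff n k + j))).map (fun (j : Nat) => (k : Int) + 1 + (j : Int)))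
              :: (PySem.List.pyRange ((k : Int) + 1) n 1).map (fun i => (i, ([] : List Int))))
        = pvDone n mask (k + 1)
          ++ (PySem.List.pyRange ((k : Int) + 1) n 1).map (fun i => (i, ([] : List Int))) := by
      rw [List.nil_append, hseg,
          show pvDone n mask (k + 1) = pvDone n mask k
              ++ [((k : Int), pvSeg mask ((k : Int) + 1) (pvOff n k) ((n - 1 - (k : Int)).toNat))]
            from by unfold pvDone; rw [List.range_succ, List.map_append, List.map_cons,
              List.map_nil]]
      simp [List.append_assoc]
    rw [hstate]
    obtain ⟨p'', hfin⟩ := ih (k + 1) (by push_cast at hkw ⊢; omega) p' hp'0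
      (by push_cast; omega)
    simp only [Nat.cast_add, Nat.cast_one] at hfin
    exact ⟨p'', hfin⟩

theorem pvB_eq_canon (n mask : Int) : graph_from_mask_alt n mask = pvCanon n mask := by
  unfold graph_from_mask_alt
  rw [pvInitGraph]
  by_cases hn2 : n < 2
  · rw [if_pos hn2]
    rcases (by omega : n ≤ 0 ∨ n = 1) with h | h
    · rw [PySem.List.pyRange_one_eq_nil (by omega)]
      simp [pvCanon, pvDone, show n.toNat = 0 from by omega]
    · subst h
      show (PySem.Dict.mk ((PySem.List.pyRange 0 1 1).map (fun i => (i, ([] : List Int))))).items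
          = pvCanon 1 mask
      rw [show PySem.List.pyRange 0 1 1 = [0] from by decide]
      simp [pvCanon, pvDone, pvSeg, List.range_one]
  · rw [if_neg hn2]
    have hn : 2 ≤ n := by omega
    -- T = n*(n-1)//2 as the accumulated offset
    have hk : ((n.toNat : Nat) : Int) = n := by omega
    have hclosed := pvOff_closed n n.toNat (by omega)
    rw [hk] at hclosed
    obtain ⟨t, ht⟩ : ∃ t, n * (n - 1) = 2 * t := by
      rcases Int.even_mul_succ_self (n - 1) with ⟨t, h⟩
      exact ⟨t, by linarith⟩
    have h1 : PySem.Int.floordiv (n * (n - 1)) 2 = t := by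
      rw [PySem.Int.floordiv_eq_ediv_of_pos (by norm_num : (0:Int) < 2), ht,
          Int.mul_ediv_cancel_left _ (by norm_num)]
    have h2 : PySem.Int.floordiv (n * (n + 1)) 2 = t + n := by
      rw [PySem.Int.floordiv_eq_ediv_of_pos (by norm_num : (0:Int) < 2),
          show n * (n + 1) = 2 * (t + n) from by linarith,
          Int.mul_ediv_cancel_left _ (by norm_num)]
    rw [h2, show n * n - (t + n) = t from by linarith] at hclosed
    have hTeq : (PySem.Int.floordiv (n * (n - 1)) 2).toNat = pvOff n n.toNat := by
      rw [h1, hclosed]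
    show (pvLoopB n
        (PySem.Int.band mask
          (((1 : Int) <<< (PySem.Int.floordiv (n * (n - 1)) 2).toNat) - 1)).toNat
        (PySem.Int.band mask (((1 : Int) <<< (PySem.Int.floordiv (n * (n - 1)) 2).toNat) - 1))
        (PySem.Dict.mk ((PySem.List.pyRange 0 n 1).map (fun i => (i, ([] : List Int))))) 0
        0).items = pvCanon n mask
    rw [hTeq]
    have hMe := pvBandMask mask (pvOff n n.toNat)
    have hM0 : 0 ≤ PySem.Int.band mask (((1 : Int) <<< pvOff n n.toNat) - 1) := by
      rw [hMe]
      exact Int.emod_nonneg mask (by positivity)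
    have hMlt : PySem.Int.band mask (((1 : Int) <<< pvOff n n.toNat) - 1)
        < ((2 ^ pvOff n n.toNat : Nat) : Int) := by
      rw [hMe]
      exact Int.emod_lt_of_pos mask (by positivity)
    have hMc : (((PySem.Int.band mask (((1 : Int) <<< pvOff n n.toNat) - 1)).toNat : Nat) : Int)
        = PySem.Int.band mask (((1 : Int) <<< pvOff n n.toNat) - 1) := Int.toNat_of_nonneg hM0
    set m0 : Nat := (PySem.Int.band mask (((1 : Int) <<< pvOff n n.toNat) - 1)).toNat with hm0def
    have hm0lt : m0 < 2 ^ pvOff n n.toNat := by omega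
    have htb : ∀ b, b < pvOff n n.toNat → m0.testBit b = pvBit mask b := by
      intro b hb
      rw [← pvBit_natCast m0 b, hMc, hMe, pvBit_emod mask _ b hb]
    rw [← hMc,
        pvLoop_eq_fold n (pvOff n n.toNat) m0 m0 le_rfl hm0lt _ 0 0,
        pvFilter_rows m0 n n.toNat,
        show pvRowsList m0 n n.toNat = pvRowsFrom m0 n n.toNat 0 from by
          have := pvRowsList_eq_from m0 n n.toNat 0
          rw [Nat.zero_add] at this
          simpa using this]
    obtain ⟨p', hfin⟩ := pvOuterB n mask m0 hn htb n.toNat 0 (by push_cast; omega) 0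
      le_rfl (by simp)
    simp only [Nat.cast_zero] at hfin
    have hoff0 : pvOffI n 0 = 0 := rfl
    rw [hoff0] at hfin
    rw [show pvDone n mask 0 = [] from rfl, List.nil_append] at hfin
    rw [hfin]
    rfl

-- ===== VERDICT (by name: the statement is the Claim_ definition above) =====
theorem graph_from_mask_spec : Claim_equal_graph_from_mask := by
  intro n mask _
  unfold Spec_graph_from_mask
  rw [pvA_eq_canon, pvB_eq_canon]
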